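-- pv_equiv track=rewrite | github.com/yoyowwww/Mastermind_Project | mastermind/devine_ordi_a_completer.py | enumerer_configs
-- ===== SOURCE A (Python) =====
-- def enumerer_configs(n_couleurs=6, p_positions=4):
--     """
--     Entrées :
--         * n_couleurs : int
--         * p_positions : int
--     Sortie ; List
--     renvoie une liste de toutes les combinaisons possibles avec les n_couleurs et p_positions
--     """
--     if (p_positions == 0):
--         return [[]]
--     else:
--         listFinale = []
--         for elt in enumerer_configs(n_couleurs, p_positions - 1):
--             for i in range(1, n_couleurs + 1):
--                 listFinale.append(elt + [i])
--         return listFinale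
-- ===== SOURCE B (Python) =====
-- def enumerer_configs(n_couleurs=6, p_positions=4):
--     if p_positions == 0:
--         return [[]]
--     if n_couleurs <= 0:
--         return []
--     total = n_couleurs ** p_positions
--     res = []
--     for k in range(total):
--         digits = []
--         for _ in range(p_positions):
--             k, d = divmod(k, n_couleurs)
--             digits.append(d + 1)
--         digits.reverse()
--         res.append(digits)
--     return res
-- ===== Notes on version B (the rewrite author's own statement) =====
-- stated objective: alternative
-- what changed: Replaces the position-recursion (Cartesian extension of each shorter configuration) with a flat loop over all n**p indices, decoding each index as a base-n number via repeated divmod into a configuration; same lexicographic output.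
import Mathlib
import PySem

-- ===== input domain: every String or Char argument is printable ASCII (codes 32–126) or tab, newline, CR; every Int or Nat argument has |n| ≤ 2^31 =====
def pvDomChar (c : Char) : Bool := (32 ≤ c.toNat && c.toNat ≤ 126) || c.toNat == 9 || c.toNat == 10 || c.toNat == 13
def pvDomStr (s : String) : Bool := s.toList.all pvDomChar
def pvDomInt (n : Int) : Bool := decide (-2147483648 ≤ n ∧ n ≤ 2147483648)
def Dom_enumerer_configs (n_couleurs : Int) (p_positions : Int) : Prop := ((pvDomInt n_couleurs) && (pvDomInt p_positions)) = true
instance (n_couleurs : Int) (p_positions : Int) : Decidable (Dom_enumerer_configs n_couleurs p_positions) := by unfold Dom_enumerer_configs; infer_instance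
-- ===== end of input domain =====

-- B replaces A's position-recursion by a flat index loop decoding each k < n**p in base n (alternative decomposition, same output and cost).


-- ===== PORT A =====
-- Literal port of A's recursion; for p_positions < 0 the Python recurses forever
-- (RecursionError) — that case is outside Pre_ and the port returns [] there.
def enumerer_configs (n_couleurs : Int) (p_positions : Int) : List (List Int) :=
  if p_positions = 0 then [[]]
  else if p_positions < 0 then []
  else
    (enumerer_configs n_couleurs (p_positions - 1)).foldl
      (fun acc elt =>
        (PySem.List.pyRange 1 (n_couleurs + 1) 1).foldl
          (fun acc2 i => acc2 ++ [elt ++ [i]]) acc) []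
termination_by p_positions.toNat
decreasing_by omega

-- ===== PORT B =====
-- inner loop of Source B: for _ in range(p): k, d = divmod(k, n); digits.append(d + 1)
def pvDecodeLoop (n : Int) : Nat → Int → List Int → List Int
  | 0, _, digits => digits
  | m + 1, k, digits =>
      pvDecodeLoop n m (PySem.Int.floordiv k n) (digits ++ [PySem.Int.mod k n + 1])

def enumerer_configs_alt (n_couleurs : Int) (p_positions : Int) : List (List Int) :=
  if p_positions = 0 then [[]]
  else if n_couleurs ≤ 0 then []
  else
    (PySem.List.pyRange 0 (n_couleurs ^ p_positions.toNat) 1).map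
      (fun k => (pvDecodeLoop n_couleurs p_positions.toNat k []).reverse)

-- ===== PRECONDITION & SPEC =====
-- Pre_ excludes p_positions < 0, where the Python A raises RecursionError.
def Pre_enumerer_configs (n_couleurs : Int) (p_positions : Int) : Prop := 0 ≤ p_positions
instance (n_couleurs : Int) (p_positions : Int) : Decidable (Pre_enumerer_configs n_couleurs p_positions) := by unfold Pre_enumerer_configs; infer_instance
def pvWitness_enumerer_configs : Int × Int := (3, 2)

def Spec_enumerer_configs (n_couleurs : Int) (p_positions : Int) (out : List (List Int)) : Prop := out = enumerer_configs_alt n_couleurs p_positions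
instance (n_couleurs : Int) (p_positions : Int) (out : List (List Int)) : Decidable (Spec_enumerer_configs n_couleurs p_positions out) := by unfold Spec_enumerer_configs; infer_instance

-- ===== CLAIM (what is proved, stated in full; the proofs are below) =====
def Claim_equal_enumerer_configs : Prop := ∀ (n_couleurs : Int) (p_positions : Int), Dom_enumerer_configs n_couleurs p_positions → Pre_enumerer_configs n_couleurs p_positions → Spec_enumerer_configs n_couleurs p_positions (enumerer_configs n_couleurs p_positions)

-- ===== LEMMAS AND PROOFS =====

-- canonical reference enumeration
def pvCanon (n : Int) : Nat → List (List Int)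
  | 0 => [[]]
  | m + 1 => (pvCanon n m).flatMap
      (fun elt => (PySem.List.pyRange 1 (n + 1) 1).map (fun i => elt ++ [i]))

lemma pv_foldl_snoc (R : List Int) (f : Int → List Int) :
    ∀ acc : List (List Int),
      R.foldl (fun a i => a ++ [f i]) acc = acc ++ R.map f := by
  induction R with
  | nil => simp
  | cons x xs ih => intro acc; simp [ih]

lemma pv_foldl_nested (n : Int) (L : List (List Int)) :
    ∀ init : List (List Int),
      L.foldl (fun acc elt =>
          (PySem.List.pyRange 1 (n + 1) 1).foldl
            (fun acc2 i => acc2 ++ [elt ++ [i]]) acc) init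
        = init ++ L.flatMap (fun elt => (PySem.List.pyRange 1 (n + 1) 1).map (fun i => elt ++ [i])) := by
  induction L with
  | nil => simp
  | cons e L ih =>
    intro init
    rw [List.foldl_cons, pv_foldl_snoc, ih]
    simp

lemma pv_A_eq_canon (n : Int) (m : Nat) : enumerer_configs n (↑m) = pvCanon n m := by
  induction m with
  | zero => simp [enumerer_configs, pvCanon]
  | succ m ih =>
    rw [enumerer_configs]
    have h0 : ((m : Int) + 1) ≠ 0 := by omega
    have h1 : ¬ ((m : Int) + 1 < 0) := by omega
    have h2 : ((m : Int) + 1) - 1 = (m : Int) := by omega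
    simp only [Nat.cast_succ, h0, h1, if_false, h2, ih, pv_foldl_nested, List.nil_append,
      pvCanon]

lemma pv_decodeLoop_acc (n : Int) (m : Nat) :
    ∀ (k : Int) (digits : List Int),
      pvDecodeLoop n m k digits = digits ++ pvDecodeLoop n m k [] := by
  induction m with
  | zero => simp [pvDecodeLoop]
  | succ m ih =>
    intro k digits
    rw [pvDecodeLoop, pvDecodeLoop, ih, ih (PySem.Int.floordiv k n) ([] ++ _)]
    simp

-- dec n m k := (pvDecodeLoop n m k []).reverse, the base-n decode, msd first
lemma pv_dec_succ (n : Int) (m : Nat) (k : Int) :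
    (pvDecodeLoop n (m + 1) k []).reverse
      = (pvDecodeLoop n m (PySem.Int.floordiv k n) []).reverse ++ [PySem.Int.mod k n + 1] := by
  rw [pvDecodeLoop, pv_decodeLoop_acc]
  simp

lemma pv_divmod_block (n q i : Int) (hn : 0 < n) (hi : 1 ≤ i) (hi2 : i < n + 1) :
    PySem.Int.floordiv (q * n + (i - 1)) n = q ∧
      PySem.Int.mod (q * n + (i - 1)) n = i - 1 := by
  have hq : PySem.Int.floordiv (q * n + (i - 1)) n = q := by
    rw [PySem.Int.floordiv_eq_iff_of_pos hn]
    constructor <;> nlinarith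
  refine ⟨hq, ?_⟩
  have := PySem.Int.floordiv_mul_add_mod (q * n + (i - 1)) n
  rw [hq] at this
  omega

lemma pv_range_mul_split (n : Int) (hn : 0 < n) (t : Nat) :
    PySem.List.pyRange 0 ((t : Int) * n) 1
      = (PySem.List.pyRange 0 (t : Int) 1).flatMap
          (fun q => (PySem.List.pyRange 1 (n + 1) 1).map (fun i => q * n + (i - 1))) := by
  induction t with
  | zero => simp [PySem.List.pyRange_one_eq_nil]
  | succ t ih =>
    have h1 : (0 : Int) ≤ (t : Int) * n := by positivity
    have h2 : ((t : Int) + 1) * n = (t : Int) * n + n := by ring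
    have h3 : (t : Int) * n ≤ ((t : Int) + 1) * n := by nlinarith
    have hsplit := PySem.List.pyRange_one_append 0 ((t : Int) * n) (((t : Int) + 1) * n) h1 h3
    push_cast
    rw [hsplit, ih, PySem.List.pyRange_one_succ_right (Int.natCast_nonneg t),
      List.flatMap_append]
    congr 1
    -- the last block: pyRange (t*n) ((t+1)*n) = image of i ∈ [1, n+1)
    have hblock : PySem.List.pyRange ((t : Int) * n) (((t : Int) + 1) * n) 1
        = (PySem.List.pyRange 1 (n + 1) 1).map (fun i => (t : Int) * n + (i - 1)) := by
      rw [PySem.List.pyRange_one, PySem.List.pyRange_one, h2, List.map_map]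
      have e1 : ((t : Int) * n + n - (t : Int) * n) = n := by ring
      have e2 : (n + 1 - 1 : Int) = n := by ring
      rw [e1, e2]
      apply List.map_congr_left
      intro a _
      simp only [Function.comp]
      ring
    simp [hblock]

lemma pv_flatMap_congr {α β : Type} {l : List α} {f g : α → List β}
    (h : ∀ a ∈ l, f a = g a) : l.flatMap f = l.flatMap g := by
  induction l with
  | nil => rfl
  | cons x xs ih =>
    simp only [List.flatMap_cons, h x (List.mem_cons_self),
      ih (fun a ha => h a (List.mem_cons_of_mem _ ha))]

lemma pv_B_eq_canon (n : Int) (hn : 0 < n) (m : Nat) :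
    (PySem.List.pyRange 0 (n ^ m) 1).map
        (fun k => (pvDecodeLoop n m k []).reverse) = pvCanon n m := by
  induction m with
  | zero =>
    simp [pvCanon, pvDecodeLoop, PySem.List.pyRange_one]
  | succ m ih =>
    have hnn : (0 : Int) ≤ n ^ m := by positivity
    have hpow : (n : Int) ^ (m + 1) = (((n ^ m).toNat : Int)) * n := by
      rw [Int.toNat_of_nonneg hnn, pow_succ]
    rw [hpow, pv_range_mul_split n hn, List.map_flatMap, Int.toNat_of_nonneg hnn]
    conv_rhs => rw [pvCanon, ← ih, List.flatMap_map]
    apply pv_flatMap_congr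
    intro q hq
    rw [List.map_map]
    apply List.map_congr_left
    intro i hi
    rw [PySem.List.mem_pyRange_one] at hi
    obtain ⟨hfd, hmd⟩ := pv_divmod_block n q i hn hi.1 hi.2
    simp only [Function.comp, pv_dec_succ]
    rw [hfd, hmd]
    norm_num

lemma pv_canon_nil (n : Int) (hn : n ≤ 0) (m : Nat) (hm : m ≠ 0) : pvCanon n m = [] := by
  cases m with
  | zero => exact absurd rfl hm
  | succ m =>
    rw [pvCanon, PySem.List.pyRange_one_eq_nil (by omega)]
    simp

-- ===== VERDICT (by name: the statement is the Claim_ definition above) =====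
theorem enumerer_configs_spec : Claim_equal_enumerer_configs := by
  intro n p _ hpre
  have hp : (0 : Int) ≤ p := hpre
  unfold Spec_enumerer_configs
  by_cases hp0 : p = 0
  · subst hp0; simp [enumerer_configs, enumerer_configs_alt]
  · obtain ⟨m, rfl⟩ : ∃ m : Nat, p = (m : Int) := ⟨p.toNat, by omega⟩
    rw [enumerer_configs_alt, if_neg hp0, pv_A_eq_canon, Int.toNat_natCast]
    by_cases hn : n ≤ 0
    · rw [if_pos hn]
      exact pv_canon_nil n hn m (by exact_mod_cast hp0)
    · rw [if_neg hn, pv_B_eq_canon n (by omega)]
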